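-- pv_equiv track=rewrite | github.com/rogue-meow/vkflow | vkflow/commands/parsing/cutters.py | _find_token
-- ===== SOURCE A (Python) =====
-- def _find_token(text: str, token: str) -> int | None:
--     """Найти токен в тексте с проверкой границ слова."""
--     idx = 0
--     while True:
--         idx = text.find(token, idx)
--         if idx == -1:
--             return None
--
--         if idx > 0 and not text[idx - 1].isspace():
--             idx += 1
--             continue
--
--         end = idx + len(token)
--         if end < len(text) and not text[end].isspace():
--             idx += 1
--             continue
--
--         return idx
-- ===== SOURCE B (Python) =====
-- def _find_token(text: str, token: str):
--     """Scan candidate word-start positions directly instead of repeated str.find."""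
--     n, m = len(text), len(token)
--     for i in range(n + 1):
--         if (i == 0 or text[i - 1].isspace()) \
--                 and text.startswith(token, i) \
--                 and (i + m >= n or text[i + m].isspace()):
--             return i
--     return None
-- ===== Notes on version B (the rewrite author's own statement) =====
-- stated objective: alternative
-- what changed: Replaces the find/retry loop (repeated str.find with boundary re-checks and idx+=1 restarts) by a single direct scan over candidate word-start positions checking startswith plus both whitespace boundaries.
import Mathlib
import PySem

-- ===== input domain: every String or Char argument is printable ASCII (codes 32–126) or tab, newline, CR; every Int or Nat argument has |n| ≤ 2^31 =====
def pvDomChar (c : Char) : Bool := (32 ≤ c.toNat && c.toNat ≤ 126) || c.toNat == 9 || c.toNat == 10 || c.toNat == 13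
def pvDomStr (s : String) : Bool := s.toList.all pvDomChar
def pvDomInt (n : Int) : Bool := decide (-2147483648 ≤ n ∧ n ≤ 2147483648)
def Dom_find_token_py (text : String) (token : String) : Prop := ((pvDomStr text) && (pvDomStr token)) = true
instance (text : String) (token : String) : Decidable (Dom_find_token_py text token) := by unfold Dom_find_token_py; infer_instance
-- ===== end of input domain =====

-- B replaces A's find/retry loop by a direct scan of candidate word-start positions; alternative decomposition, same cost.


-- ===== PORT A =====
-- helper facts the loop's termination cites
theorem pvFindFrom_past (s tok : List Char) (k : Nat) (hk : s.length < k) :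
    PySem.Chars.findFrom s tok (k : Int) none = -1 := by
  simp only [PySem.Chars.findFrom]
  have h1 : ((s.length : Int)) < (k : Int) := by exact_mod_cast hk
  have h2 : ¬ ((k : Int) < 0) := by omega
  simp [h2, h1]

theorem pvFindFrom_bounds (s tok : List Char) (k : Nat)
    (h : PySem.Chars.findFrom s tok (k : Int) none ≠ -1) :
    k ≤ (PySem.Chars.findFrom s tok (k : Int) none).toNat ∧
    (PySem.Chars.findFrom s tok (k : Int) none).toNat ≤ s.length := by
  by_cases hk : k ≤ s.length
  · have hs := PySem.Chars.findFrom_natCast_spec s tok k hk h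
    have hrw := PySem.Chars.findFrom_natCast s tok k hk
    have hle := PySem.Chars.find_le_length (List.drop k s) tok
    have hne : PySem.Chars.find (List.drop k s) tok ≠ -1 := by
      intro hc; rw [hrw, hc] at h; simp at h
    have hnn : 0 ≤ PySem.Chars.find (List.drop k s) tok := by
      have := PySem.Chars.neg_one_le_find (List.drop k s) tok; omega
    constructor
    · omega
    · rw [hrw]; simp [hne]
      rw [List.length_drop] at hle
      omega
  · exact absurd (pvFindFrom_past s tok k (by omega)) h

-- A's while-loop: idx = text.find(token, idx); boundary checks; on failure idx += 1 and retry
def findTokenLoopA (s tok : List Char) (idx : Nat) : Option Int :=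
  let j := PySem.Chars.findFrom s tok (idx : Int) none
  if hj : j = -1 then none
  else
    let jn := j.toNat
    if decide (0 < jn) && !(PySem.Str.isspace (s.getD (jn - 1) ' ')) then
      findTokenLoopA s tok (jn + 1)
    else
      let e := jn + tok.length
      if decide (e < s.length) && !(PySem.Str.isspace (s.getD e ' ')) then
        findTokenLoopA s tok (jn + 1)
      else
        some j
termination_by s.length + 1 - idx
decreasing_by
  all_goals
    have hb := pvFindFrom_bounds s tok idx hj
    omega

def find_token_py (text : String) (token : String) : Option Int :=
  findTokenLoopA text.toList token.toList 0

-- ===== PORT B =====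
-- B's word-start condition at position i
def pvCondB (s tok : List Char) (i : Nat) : Bool :=
  (decide (i = 0) || PySem.Str.isspace (s.getD (i - 1) ' '))
    && PySem.Chars.startswith (List.drop i s) tok
    && (decide (s.length ≤ i + tok.length) || PySem.Str.isspace (s.getD (i + tok.length) ' '))

-- B's for-loop over i in range(len(text) + 1)
def findTokenLoopB (s tok : List Char) (i : Nat) : Option Int :=
  if s.length < i then none
  else if pvCondB s tok i then some (i : Int)
  else findTokenLoopB s tok (i + 1)
termination_by s.length + 1 - i

def find_token_py_alt (text : String) (token : String) : Option Int :=
  findTokenLoopB text.toList token.toList 0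

-- ===== PRECONDITION & SPEC =====
def Spec_find_token_py (text : String) (token : String) (out : Option Int) : Prop := out = find_token_py_alt text token
instance (text : String) (token : String) (out : Option Int) : Decidable (Spec_find_token_py text token out) := by unfold Spec_find_token_py; infer_instance

-- ===== CLAIM (what is proved, stated in full; the proofs are below) =====
def Claim_equal_find_token_py : Prop := ∀ (text : String) (token : String), Dom_find_token_py text token → Spec_find_token_py text token (find_token_py text token)

-- ===== LEMMAS AND PROOFS =====

-- a prefix of a later drop is an infix of the earlier drop
theorem pvPrefix_drop_infix (s tok : List Char) (k i : Nat) (hki : k ≤ i)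
    (h : tok <+: List.drop i s) : tok <:+: List.drop k s := by
  have : List.drop i s = List.drop (i - k) (List.drop k s) := by
    rw [List.drop_drop]; congr 1; omega
  rw [this] at h
  exact h.isInfix.trans (List.drop_suffix _ _).isInfix

theorem pvCondB_false_of_no_prefix (s tok : List Char) (i : Nat)
    (h : ¬ tok <+: List.drop i s) : pvCondB s tok i = false := by
  unfold pvCondB
  have : PySem.Chars.startswith (List.drop i s) tok = false := by
    cases hs : PySem.Chars.startswith (List.drop i s) tok
    · rfl
    · exact absurd ((PySem.Chars.startswith_iff _ _).mp hs) h
  simp [this]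

theorem pvLoopB_none (s tok : List Char) (idx : Nat)
    (h : ∀ i, idx ≤ i → ¬ tok <+: List.drop i s) :
    findTokenLoopB s tok idx = none := by
  rw [findTokenLoopB]
  by_cases hi : s.length < idx
  · simp [hi]
  · rw [if_neg hi, pvCondB_false_of_no_prefix s tok idx (h idx le_rfl)]
    simp only [Bool.false_eq_true, if_false]
    exact pvLoopB_none s tok (idx + 1) (fun i hle => h i (by omega))
termination_by s.length + 1 - idx

theorem pvLoopB_skip (s tok : List Char) (idx j : Nat) (hij : idx ≤ j)
    (h : ∀ i, idx ≤ i → i < j → ¬ tok <+: List.drop i s) :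
    findTokenLoopB s tok idx = findTokenLoopB s tok j := by
  rcases Nat.eq_or_lt_of_le hij with heq | hlt
  · rw [heq]
  · rw [findTokenLoopB]
    by_cases hi : s.length < idx
    · rw [if_pos hi]
      rw [pvLoopB_none s tok j (fun i hle => by
        intro hp
        have hlen : tok = [] := by
          have hd : List.drop i s = [] := List.drop_eq_nil_of_le (by omega)
          rw [hd] at hp; exact List.prefix_nil.mp hp
        have := h idx le_rfl hlt
        apply this
        rw [hlen]
        exact List.nil_prefix)]
    · rw [if_neg hi, pvCondB_false_of_no_prefix s tok idx (h idx le_rfl hlt)]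
      simp only [Bool.false_eq_true, if_false]
      exact pvLoopB_skip s tok (idx + 1) j hlt (fun i h1 h2 => h i (by omega) h2)
termination_by j - idx

theorem pvLoops_eq (s tok : List Char) (idx : Nat) :
    findTokenLoopA s tok idx = findTokenLoopB s tok idx := by
  rw [findTokenLoopA]
  by_cases hj : PySem.Chars.findFrom s tok (idx : Int) none = -1
  · simp only [hj, dif_pos]
    by_cases hk : idx ≤ s.length
    · exact (pvLoopB_none s tok idx (fun i hle hp =>
        (PySem.Chars.findFrom_natCast_eq_neg_one_iff s tok idx hk).mp hj
          (pvPrefix_drop_infix s tok idx i hle hp))).symm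
    · rw [findTokenLoopB, if_pos (by omega)]
  · rw [dif_neg hj]
    have hb := pvFindFrom_bounds s tok idx hj
    have hk : idx ≤ s.length := by omega
    have hs := PySem.Chars.findFrom_natCast_spec s tok idx hk hj
    set j := PySem.Chars.findFrom s tok (idx : Int) none with hjdef
    have hj0 : 0 ≤ j := by
      have := hs.1; omega
    have hskip := pvLoopB_skip s tok idx j.toNat hb.1
      (fun i h1 h2 => hs.2.2 i h1 h2)
    have hstart : PySem.Chars.startswith (List.drop j.toNat s) tok = true :=
      (PySem.Chars.startswith_iff _ _).mpr hs.2.1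
    dsimp only
    split
    · -- left boundary fails: A retries from j+1; B's condition at j is false
      next hL =>
      simp only [Bool.and_eq_true, decide_eq_true_eq, Bool.not_eq_eq_eq_not,
        Bool.not_true] at hL
      rw [pvLoops_eq s tok (j.toNat + 1), hskip]
      have hcond : pvCondB s tok j.toNat = false := by
        unfold pvCondB
        have h0 : decide (j.toNat = 0) = false := by
          simp
          omega
        rw [h0, hL.2]
        simp only [Bool.or_self, Bool.false_and]
      conv_rhs => rw [findTokenLoopB]
      rw [if_neg (show ¬ s.length < j.toNat by omega), hcond]
      simp only [Bool.false_eq_true, if_false]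
    · next hL =>
      simp only [Bool.and_eq_true, decide_eq_true_eq, Bool.not_eq_eq_eq_not,
        Bool.not_true, not_and, Bool.not_eq_false] at hL
      split
      · -- right boundary fails: same retry
        next hR =>
        simp only [Bool.and_eq_true, decide_eq_true_eq, Bool.not_eq_eq_eq_not,
          Bool.not_true] at hR
        rw [pvLoops_eq s tok (j.toNat + 1), hskip]
        have hcond : pvCondB s tok j.toNat = false := by
          unfold pvCondB
          have h0 : decide (s.length ≤ j.toNat + tok.length) = false := by
            simp
            omega
          rw [h0, hR.2]
          simp only [Bool.or_self, Bool.and_false]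
        conv_rhs => rw [findTokenLoopB]
        rw [if_neg (show ¬ s.length < j.toNat by omega), hcond]
        simp only [Bool.false_eq_true, if_false]
      · -- both boundaries hold: both return j
        next hR =>
        simp only [Bool.and_eq_true, decide_eq_true_eq, Bool.not_eq_eq_eq_not,
          Bool.not_true, not_and, Bool.not_eq_false] at hR
        rw [hskip]
        have hcond : pvCondB s tok j.toNat = true := by
          unfold pvCondB
          have h1 : (decide (j.toNat = 0) || PySem.Str.isspace (s.getD (j.toNat - 1) ' ')) = true := by
            by_cases h0 : j.toNat = 0
            · simp [h0]
            · rw [hL (by omega)]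
              simp
          have h2 : (decide (s.length ≤ j.toNat + tok.length)
              || PySem.Str.isspace (s.getD (j.toNat + tok.length) ' ')) = true := by
            by_cases hlen : s.length ≤ j.toNat + tok.length
            · simp [hlen]
            · rw [hR (by omega)]
              simp
          rw [h1, h2, hstart]
          rfl
        conv_rhs => rw [findTokenLoopB]
        rw [if_neg (show ¬ s.length < j.toNat by omega), hcond]
        simp only [if_true]
        rw [Int.toNat_of_nonneg hj0]
termination_by s.length + 1 - idx
decreasing_by all_goals omega

-- ===== VERDICT (by name: the statement is the Claim_ definition above) =====
theorem find_token_py_spec : Claim_equal_find_token_py := by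
  intro text token _
  unfold Spec_find_token_py find_token_py find_token_py_alt
  exact pvLoops_eq text.toList token.toList 0
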